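-- pv_equiv track=rewrite | github.com/Zahid-Pathan/Agentic_AI_for_tabular_document_extraction | src/pdf_agent.py | _extract_column_headers
-- ===== SOURCE A (Python) =====
-- from typing import Dict, List, Any, Optional
--
-- def _extract_column_headers(table: List[List[str]], header_rows: List[int]) -> Dict[int, List[str]]:
--     """
--     Collect header strings per column from the identified header rows.
--     """
--     headers: Dict[int, List[str]] = {}
--     if not header_rows:
--         return headers
--     max_cols = max(len(r) for r in table)
--     for c in range(max_cols):
--         col_hdrs: List[str] = []
--         for r in header_rows:
--             row = table[r]
--             if c < len(row):
--                 s = (row[c] or "").strip()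
--                 if s:
--                     col_hdrs.append(s)
--         if col_hdrs:
--             headers[c] = col_hdrs
--     return headers
-- ===== SOURCE B (Python) =====
-- from typing import Dict, List
--
-- def _extract_column_headers(table: List[List[str]], header_rows: List[int]) -> Dict[int, List[str]]:
--     """
--     Row-major regrouping: scan each header row once, bucketing non-empty
--     stripped cells by column, then emit the buckets in ascending column order.
--     """
--     groups: Dict[int, List[str]] = {}
--     for r in header_rows:
--         row = table[r]
--         for c in range(len(row)):
--             s = row[c].strip()
--             if s:
--                 groups.setdefault(c, []).append(s)
--     return {c: groups[c] for c in sorted(groups)}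
-- ===== Notes on version B (the rewrite author's own statement) =====
-- stated objective: alternative
-- what changed: B replaces A's column-major nested scan (compute max_cols, then for each column rescan every header row) by a single row-major pass that buckets non-empty stripped cells into a dict keyed by column, emitting buckets in sorted key order.
-- outside the precondition, e.g. on _extract_column_headers([[], []], [5, 1, 1, -3, 46]): A returns {}, B raises IndexError
import Mathlib
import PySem

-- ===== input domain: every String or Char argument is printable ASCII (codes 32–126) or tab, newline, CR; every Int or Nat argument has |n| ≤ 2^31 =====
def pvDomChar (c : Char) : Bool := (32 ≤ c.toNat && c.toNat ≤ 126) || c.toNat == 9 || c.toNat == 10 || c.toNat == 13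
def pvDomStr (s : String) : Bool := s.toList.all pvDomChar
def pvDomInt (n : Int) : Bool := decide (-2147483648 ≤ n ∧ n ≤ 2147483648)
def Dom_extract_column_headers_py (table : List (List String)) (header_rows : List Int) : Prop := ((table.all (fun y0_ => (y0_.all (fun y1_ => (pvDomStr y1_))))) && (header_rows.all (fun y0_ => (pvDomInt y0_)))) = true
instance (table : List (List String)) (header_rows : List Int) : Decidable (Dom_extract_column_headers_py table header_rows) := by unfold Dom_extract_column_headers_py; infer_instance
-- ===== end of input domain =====

-- B replaces A's column-major nested scan by one row-major pass into a dict keyed by column,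
-- emitted in sorted key order (alternative decomposition, same result).

-- ===== PORT A =====
-- ((table.map …).max?).getD 0 ports 'max(len(r) for r in table)'; Pre_ guarantees table ≠ []
-- whenever this line is reached, so the default is never used on admitted inputs.
def extract_column_headers_py (table : List (List String)) (header_rows : List Int) : List (Int × List String) :=
  if header_rows = [] then []
  else
    let max_cols : Int := (PySem.List.max? (table.map (fun r => (r.length : Int))) (fun x => x)).getD 0
    (PySem.List.pyRange 0 max_cols).foldl (fun headers c =>
      let col_hdrs : List String := header_rows.foldl (fun acc r =>
        let row := PySem.List.pyGetD table r []
        if c < (row.length : Int) then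
          let s := PySem.Str.strip (PySem.List.pyGetD row c "")
          if s ≠ "" then acc ++ [s] else acc
        else acc) []
      if col_hdrs ≠ [] then headers ++ [(c, col_hdrs)] else headers) []

-- ===== PORT B =====
def extract_column_headers_py_alt (table : List (List String)) (header_rows : List Int) : List (Int × List String) :=
  let groups : PySem.Dict Int (List String) := header_rows.foldl (fun g r =>
    let row := PySem.List.pyGetD table r []
    (PySem.List.pyRange 0 (row.length : Int)).foldl (fun g c =>
      let s := PySem.Str.strip (PySem.List.pyGetD row c "")
      if s ≠ "" then g.modify c [] (· ++ [s]) else g) g) PySem.Dict.empty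
  (PySem.List.sorted groups.keys (fun c => c)).map (fun c => (c, groups.getD c []))

-- ===== PRECONDITION & SPEC =====
-- Pre_ excludes the inputs where A raises (ValueError on an empty table with header rows present,
-- IndexError on an out-of-range header-row index) and, when every row of the table is empty,
-- out-of-range header-row indices that A never dereferences (range(max_cols) is empty, so A
-- returns {}) while B's row-major pass indexes table[r] and raises IndexError there.
def Pre_extract_column_headers_py (table : List (List String)) (header_rows : List Int) : Prop :=
  header_rows = [] ∨ (table ≠ [] ∧ ∀ r ∈ header_rows, PySem.Raise.InRange table.length r)
instance (table : List (List String)) (header_rows : List Int) : Decidable (Pre_extract_column_headers_py table header_rows) := by unfold Pre_extract_column_headers_py; infer_instance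

def pvWitness_extract_column_headers_py : List (List String) × List Int := ([[" a ", ""], ["b"]], [0, 1])

def Spec_extract_column_headers_py (table : List (List String)) (header_rows : List Int) (out : List (Int × List String)) : Prop := out = extract_column_headers_py_alt table header_rows
instance (table : List (List String)) (header_rows : List Int) (out : List (Int × List String)) : Decidable (Spec_extract_column_headers_py table header_rows out) := by unfold Spec_extract_column_headers_py; infer_instance

-- ===== CLAIM (what is proved, stated in full; the proofs are below) =====
def Claim_equal_extract_column_headers_py : Prop := ∀ (table : List (List String)) (header_rows : List Int), Dom_extract_column_headers_py table header_rows → Pre_extract_column_headers_py table header_rows → Spec_extract_column_headers_py table header_rows (extract_column_headers_py table header_rows)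

-- ===== LEMMAS AND PROOFS =====

-- the contribution of one row at column c (as both programs compute it)
def pvCell (row : List String) (c : Int) : List String :=
  if 0 ≤ c ∧ c < (row.length : Int) ∧ PySem.Str.strip (PySem.List.pyGetD row c "") ≠ "" then
    [PySem.Str.strip (PySem.List.pyGetD row c "")] else []

-- the full header list of column c
def pvCols (table : List (List String)) (hr : List Int) (c : Int) : List String :=
  hr.flatMap (fun r => pvCell (PySem.List.pyGetD table r []) c)

-- B's inner loop body / loop, named for the proofs
def pvStepB (row : List String) (g : PySem.Dict Int (List String)) (c : Int) : PySem.Dict Int (List String) :=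
  let s := PySem.Str.strip (PySem.List.pyGetD row c "")
  if s ≠ "" then g.modify c [] (· ++ [s]) else g

def pvJ (row : List String) (n : Nat) (g : PySem.Dict Int (List String)) : PySem.Dict Int (List String) :=
  (List.range n).foldl (fun g (k : Nat) => pvStepB row g (k : Int)) g

def pvOuterB (table : List (List String)) (hr : List Int) : PySem.Dict Int (List String) :=
  hr.foldl (fun g r => pvJ (PySem.List.pyGetD table r []) (PySem.List.pyGetD table r []).length g) PySem.Dict.empty

lemma pvInnerA_eq (table : List (List String)) (c : Int) (hc : 0 ≤ c) :
    ∀ (hr : List Int) (acc : List String),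
    hr.foldl (fun acc r =>
      let row := PySem.List.pyGetD table r []
      if c < (row.length : Int) then
        let s := PySem.Str.strip (PySem.List.pyGetD row c "")
        if s ≠ "" then acc ++ [s] else acc
      else acc) acc = acc ++ pvCols table hr c := by
  intro hr
  induction hr with
  | nil => intro acc; simp [pvCols]
  | cons r hr ih =>
    intro acc
    simp only [List.foldl_cons, pvCols, List.flatMap_cons]
    rw [ih]
    have hcell : (if c < ((PySem.List.pyGetD table r []).length : Int) then
        (if PySem.Str.strip (PySem.List.pyGetD (PySem.List.pyGetD table r []) c "") ≠ "" then
          acc ++ [PySem.Str.strip (PySem.List.pyGetD (PySem.List.pyGetD table r []) c "")] else acc)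
      else acc) = acc ++ pvCell (PySem.List.pyGetD table r []) c := by
      unfold pvCell
      split_ifs <;> simp_all
    simp only [pvCols] at *
    rw [hcell, List.append_assoc]

lemma pvJ_succ (row : List String) (n : Nat) (g : PySem.Dict Int (List String)) :
    pvJ row (n+1) g = pvStepB row (pvJ row n g) (n : Int) := by
  unfold pvJ
  rw [List.range_succ, List.foldl_append]
  rfl

lemma pvJ_getD (row : List String) (n : Nat) (g : PySem.Dict Int (List String)) (c : Int) :
    (pvJ row n g).getD c [] = g.getD c [] ++
      (if 0 ≤ c ∧ c < (n : Int) ∧ PySem.Str.strip (PySem.List.pyGetD row c "") ≠ "" then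
        [PySem.Str.strip (PySem.List.pyGetD row c "")] else []) := by
  induction n with
  | zero =>
    have h0 : ¬ (0 ≤ c ∧ c < ((0:Nat) : Int) ∧ PySem.Str.strip (PySem.List.pyGetD row c "") ≠ "") := by
      rintro ⟨h1, h2, -⟩
      push_cast at h2; omega
    unfold pvJ
    rw [List.range_zero, List.foldl_nil, if_neg h0, List.append_nil]
  | succ n ih =>
    rw [pvJ_succ]
    unfold pvStepB
    simp only []
    by_cases hs : PySem.Str.strip (PySem.List.pyGetD row (n : Int) "") = ""
    · rw [if_neg (by simpa using hs), ih]
      have : (0 ≤ c ∧ c < ((n+1 : Nat) : Int) ∧ PySem.Str.strip (PySem.List.pyGetD row c "") ≠ "")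
           ↔ (0 ≤ c ∧ c < (n : Int) ∧ PySem.Str.strip (PySem.List.pyGetD row c "") ≠ "") := by
        constructor
        · rintro ⟨h1, h2, h3⟩
          refine ⟨h1, ?_, h3⟩
          by_cases hc : c = (n : Int)
          · exact absurd (hc ▸ hs) h3
          · push_cast at h2 ⊢; omega
        · rintro ⟨h1, h2, h3⟩; exact ⟨h1, by push_cast at h2 ⊢; omega, h3⟩
      rw [if_congr this rfl rfl]
    · rw [if_pos hs, PySem.Dict.getD_modify]
      by_cases hc : c = (n : Int)
      · subst hc
        rw [ih]
        have hno : ¬ (0 ≤ (n:Int) ∧ (n:Int) < (n : Int) ∧ PySem.Str.strip (PySem.List.pyGetD row (n:Int) "") ≠ "") := by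
          rintro ⟨-, h2, -⟩; omega
        have hyes : (0 ≤ (n:Int) ∧ (n:Int) < ((n+1 : Nat) : Int) ∧ PySem.Str.strip (PySem.List.pyGetD row (n:Int) "") ≠ "") := by
          refine ⟨by omega, by push_cast; omega, hs⟩
        rw [if_pos rfl, if_neg hno, if_pos hyes, List.append_nil]
      · rw [if_neg hc, ih]
        have : (0 ≤ c ∧ c < ((n+1 : Nat) : Int) ∧ PySem.Str.strip (PySem.List.pyGetD row c "") ≠ "")
             ↔ (0 ≤ c ∧ c < (n : Int) ∧ PySem.Str.strip (PySem.List.pyGetD row c "") ≠ "") := by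
          constructor
          · rintro ⟨h1, h2, h3⟩; exact ⟨h1, by push_cast at h2 ⊢; omega, h3⟩
          · rintro ⟨h1, h2, h3⟩; exact ⟨h1, by push_cast at h2 ⊢; omega, h3⟩
        rw [if_congr this rfl rfl]

lemma pvJ_mem_keys (row : List String) (n : Nat) (g : PySem.Dict Int (List String)) (c : Int) :
    c ∈ (pvJ row n g).keys ↔ c ∈ g.keys ∨
      (0 ≤ c ∧ c < (n : Int) ∧ PySem.Str.strip (PySem.List.pyGetD row c "") ≠ "") := by
  induction n with
  | zero =>
    unfold pvJ
    rw [List.range_zero, List.foldl_nil]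
    constructor
    · exact Or.inl
    · rintro (hg | ⟨h1, h2, -⟩)
      · exact hg
      · exfalso; push_cast at h2; omega
  | succ n ih =>
    rw [pvJ_succ]
    unfold pvStepB
    simp only []
    by_cases hs : PySem.Str.strip (PySem.List.pyGetD row (n : Int) "") = ""
    · rw [if_neg (by simpa using hs), ih]
      constructor
      · rintro (hg | ⟨h1, h2, h3⟩)
        · exact Or.inl hg
        · exact Or.inr ⟨h1, by push_cast at h2 ⊢; omega, h3⟩
      · rintro (hg | ⟨h1, h2, h3⟩)
        · exact Or.inl hg
        · refine Or.inr ⟨h1, ?_, h3⟩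
          by_cases hc : c = (n : Int)
          · exact absurd (hc ▸ hs) h3
          · push_cast at h2 ⊢; omega
    · rw [if_pos hs, PySem.Dict.keys_modify, PySem.Dict.mem_keys_insert, ih]
      constructor
      · rintro (hc | hg | ⟨h1, h2, h3⟩)
        · subst hc; exact Or.inr ⟨by omega, by push_cast; omega, hs⟩
        · exact Or.inl hg
        · exact Or.inr ⟨h1, by push_cast at h2 ⊢; omega, h3⟩
      · rintro (hg | ⟨h1, h2, h3⟩)
        · exact Or.inr (Or.inl hg)
        · by_cases hc : c = (n : Int)
          · exact Or.inl hc
          · refine Or.inr (Or.inr ⟨h1, ?_, h3⟩)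
            push_cast at h2 ⊢; omega

lemma pvJ_nodup (row : List String) (n : Nat) (g : PySem.Dict Int (List String))
    (h : g.keys.Nodup) : (pvJ row n g).keys.Nodup := by
  induction n with
  | zero =>
    unfold pvJ
    rw [List.range_zero, List.foldl_nil]
    exact h
  | succ n ih =>
    rw [pvJ_succ]
    unfold pvStepB
    simp only []
    by_cases hs : PySem.Str.strip (PySem.List.pyGetD row (n : Int) "") = ""
    · rw [if_neg (by simpa using hs)]; exact ih
    · rw [if_pos hs, PySem.Dict.keys_modify]
      exact PySem.Dict.nodup_keys_insert _ _ _ ih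

lemma pvOuterB_getD (table : List (List String)) :
    ∀ (hr : List Int) (g : PySem.Dict Int (List String)) (c : Int),
    (hr.foldl (fun g r => pvJ (PySem.List.pyGetD table r []) (PySem.List.pyGetD table r []).length g) g).getD c []
      = g.getD c [] ++ pvCols table hr c := by
  intro hr
  induction hr with
  | nil => intro g c; simp [pvCols]
  | cons r hr ih =>
    intro g c
    rw [List.foldl_cons, ih, pvJ_getD]
    show _ = g.getD c [] ++ pvCols table (r :: hr) c
    simp only [pvCols, List.flatMap_cons, pvCell]
    rw [List.append_assoc]

lemma pvCell_ne_nil (row : List String) (c : Int) :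
    pvCell row c ≠ [] ↔ (0 ≤ c ∧ c < (row.length : Int) ∧ PySem.Str.strip (PySem.List.pyGetD row c "") ≠ "") := by
  unfold pvCell
  split_ifs with h <;> simp [h]

lemma pvOuterB_mem_keys (table : List (List String)) :
    ∀ (hr : List Int) (g : PySem.Dict Int (List String)) (c : Int),
    c ∈ (hr.foldl (fun g r => pvJ (PySem.List.pyGetD table r []) (PySem.List.pyGetD table r []).length g) g).keys
      ↔ c ∈ g.keys ∨ pvCols table hr c ≠ [] := by
  intro hr
  induction hr with
  | nil => intro g c; simp [pvCols]
  | cons r hr ih =>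
    intro g c
    rw [List.foldl_cons, ih, pvJ_mem_keys, ← pvCell_ne_nil]
    have hsplit : pvCols table (r :: hr) c ≠ [] ↔
        pvCell (PySem.List.pyGetD table r []) c ≠ [] ∨ pvCols table hr c ≠ [] := by
      simp only [pvCols, List.flatMap_cons, ne_eq, List.append_eq_nil_iff, not_and_or]
    rw [hsplit]
    tauto

lemma pvOuterB_nodup (table : List (List String)) :
    ∀ (hr : List Int) (g : PySem.Dict Int (List String)), g.keys.Nodup →
    (hr.foldl (fun g r => pvJ (PySem.List.pyGetD table r []) (PySem.List.pyGetD table r []).length g) g).keys.Nodup := by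
  intro hr
  induction hr with
  | nil => intro g h; exact h
  | cons r hr ih =>
    intro g h
    rw [List.foldl_cons]
    exact ih _ (pvJ_nodup _ _ _ h)

lemma pvAlt_eq (table : List (List String)) (hr : List Int) :
    extract_column_headers_py_alt table hr =
      (PySem.List.sorted (pvOuterB table hr).keys (fun c => c)).map
        (fun c => (c, (pvOuterB table hr).getD c [])) := by
  unfold extract_column_headers_py_alt pvOuterB
  have hfold : hr.foldl (fun g r =>
      let row := PySem.List.pyGetD table r []
      (PySem.List.pyRange 0 (row.length : Int)).foldl (fun g c =>
        let s := PySem.Str.strip (PySem.List.pyGetD row c "")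
        if s ≠ "" then g.modify c [] (· ++ [s]) else g) g) PySem.Dict.empty
    = hr.foldl (fun g r => pvJ (PySem.List.pyGetD table r []) (PySem.List.pyGetD table r []).length g) PySem.Dict.empty := by
    refine PySem.List.foldl_congr_mem hr _ _ _ ?_
    intro g r _
    show (PySem.List.pyRange 0 ((PySem.List.pyGetD table r []).length : Int)).foldl _ g = _
    rw [PySem.List.pyRange_zero_nat, List.foldl_map]
    rfl
  rw [hfold]

-- ===== VERDICT (by name: the statement is the Claim_ definition above) =====
theorem extract_column_headers_py_spec : Claim_equal_extract_column_headers_py := by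
  intro table hr hdom hpre
  unfold Spec_extract_column_headers_py
  by_cases hhr : hr = []
  · subst hhr
    rw [pvAlt_eq]
    show extract_column_headers_py table [] = _
    unfold extract_column_headers_py pvOuterB
    rw [if_pos rfl, List.foldl_nil, PySem.Dict.keys_empty]
    rfl
  · rcases hpre with h | ⟨htab, hin⟩
    · exact absurd h hhr
    -- name the max and the filter predicate
    have hne : table.map (fun r => (r.length : Int)) ≠ [] := by
      simpa using htab
    obtain ⟨m, hm⟩ : ∃ m, PySem.List.max? (table.map (fun r => (r.length : Int))) (fun x => x) = some m := by
      cases hmax : PySem.List.max? (table.map (fun r => (r.length : Int))) (fun x => x) with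
      | none => exact absurd ((PySem.List.max?_eq_none_iff _ _).mp hmax) hne
      | some m => exact ⟨m, rfl⟩
    have hbound : ∀ c : Int, pvCols table hr c ≠ [] → 0 ≤ c ∧ c < m := by
      intro c hc
      obtain ⟨r, hrmem, hcell⟩ : ∃ r ∈ hr, pvCell (PySem.List.pyGetD table r []) c ≠ [] := by
        by_contra hno
        push Not at hno
        exact hc (by simpa [pvCols, List.flatMap_eq_nil_iff] using hno)
      obtain ⟨h0, hlt, -⟩ := (pvCell_ne_nil _ _).mp hcell
      have hrow : PySem.List.pyGetD table r [] ∈ table :=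
        PySem.List.pyGetD_mem table [] (hin r hrmem)
      have hlen : ((PySem.List.pyGetD table r []).length : Int) ∈ table.map (fun r => (r.length : Int)) :=
        List.mem_map_of_mem hrow
      have := PySem.List.max?_isMax hm _ hlen
      exact ⟨h0, by omega⟩
    -- A's side: filter-and-map form
    have hA : extract_column_headers_py table hr =
        ((PySem.List.pyRange 0 m).filter (fun c => !(pvCols table hr c).isEmpty)).map
          (fun c => (c, pvCols table hr c)) := by
      unfold extract_column_headers_py
      rw [if_neg hhr]
      show (PySem.List.pyRange 0 ((PySem.List.max? (table.map (fun r => (r.length : Int))) (fun x => x)).getD 0)).foldl _ [] = _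
      rw [hm]
      show (PySem.List.pyRange 0 m).foldl _ [] = _
      rw [PySem.List.foldl_congr_mem (PySem.List.pyRange 0 m) _
        (fun headers c => if (!(pvCols table hr c).isEmpty) = true then headers ++ [(c, pvCols table hr c)] else headers) []
        ?_]
      · rw [PySem.List.foldl_append_if]
        simp
      · intro acc c hc
        have hc0 : 0 ≤ c := (PySem.List.mem_pyRange_one.mp hc).1
        show (let col_hdrs : List String := hr.foldl _ []; if col_hdrs ≠ [] then acc ++ [(c, col_hdrs)] else acc) = _
        simp only []
        rw [pvInnerA_eq table c hc0 hr []]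
        simp only [List.nil_append]
        by_cases hcol : pvCols table hr c = []
        · rw [if_neg (by simp [hcol]), if_neg (by simp [hcol])]
        · rw [if_pos hcol, if_pos (by simp [hcol])]
    -- B's side
    have hgetD : ∀ c : Int, (pvOuterB table hr).getD c [] = pvCols table hr c := by
      intro c
      unfold pvOuterB
      rw [pvOuterB_getD, PySem.Dict.getD_empty, List.nil_append]
    have hmem : ∀ c : Int, c ∈ (pvOuterB table hr).keys ↔ pvCols table hr c ≠ [] := by
      intro c
      unfold pvOuterB
      rw [pvOuterB_mem_keys]
      simp [PySem.Dict.keys_empty]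
    have hnodupK : (pvOuterB table hr).keys.Nodup :=
      pvOuterB_nodup table hr PySem.Dict.empty PySem.Dict.nodup_keys_empty
    have hsorted : PySem.List.sorted (pvOuterB table hr).keys (fun c => c)
        = (PySem.List.pyRange 0 m).filter (fun c => !(pvCols table hr c).isEmpty) := by
      apply PySem.List.sorted_eq_of_perm_of_pairwise_lt
      · rw [List.perm_ext_iff_of_nodup (List.Nodup.filter _ (PySem.List.nodup_pyRange_one 0 m)) hnodupK]
        intro c
        rw [List.mem_filter, hmem c, PySem.List.mem_pyRange_one]
        constructor
        · rintro ⟨-, hp⟩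
          simpa using hp
        · intro hc
          refine ⟨?_, by simpa using hc⟩
          have := hbound c hc
          omega
      · exact List.Pairwise.filter _ (PySem.List.pairwise_lt_pyRange_one 0 m)
    rw [hA, pvAlt_eq, hsorted]
    apply List.map_congr_left
    intro c _
    rw [hgetD c]
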